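-- pv_equiv track=rewrite | github.com/XiaotongShen/Data-Structure-and-Algorithm | Zuo/Basic/Class17/Code05_ReversStackUsingRecursive.py | f
-- ===== SOURCE A (Python) =====
-- def f(stack):
--     res = stack.pop()
--     if len(stack) == 0:
--         return res
--     else:
--         last = f(stack)
--         stack.append(res)
--         return last
-- ===== SOURCE B (Python) =====
-- def f(stack):
--     temp = []
--     while len(stack) > 1:
--         temp.append(stack.pop())
--     bottom = stack.pop()
--     while temp:
--         stack.append(temp.pop())
--     return bottom
-- ===== Notes on version B (the rewrite author's own statement) =====
-- stated objective: alternative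
-- what changed: Replaces A's recursion (one call frame per element) with an explicit iterative loop that pops the top elements into a temp list, pops the bottom, and pushes the saved elements back in order.
import Mathlib
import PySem

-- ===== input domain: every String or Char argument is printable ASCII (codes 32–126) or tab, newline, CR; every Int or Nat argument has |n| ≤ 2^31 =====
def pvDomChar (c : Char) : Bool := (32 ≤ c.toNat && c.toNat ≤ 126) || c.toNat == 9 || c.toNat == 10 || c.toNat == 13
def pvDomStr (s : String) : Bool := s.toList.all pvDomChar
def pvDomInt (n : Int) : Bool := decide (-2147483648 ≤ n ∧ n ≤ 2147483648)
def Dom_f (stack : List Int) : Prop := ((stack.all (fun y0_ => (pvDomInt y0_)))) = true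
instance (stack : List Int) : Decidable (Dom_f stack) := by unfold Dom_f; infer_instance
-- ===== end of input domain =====

-- B replaces A's recursion with an explicit iterative loop using a temp stack; same return
-- value (the bottom element). Both Pythons mutate the argument identically (the bottom element
-- is removed in place); the equivalence proved here is about the RETURN value only.

-- ===== PORT A =====
-- A: pop the top (last) element; if the stack became empty it was the bottom, return it;
-- otherwise recurse for the bottom and push the popped element back (the push does not
-- affect the return value). stack.pop() on [] raises IndexError → excluded by Pre_f.
def f (stack : List Int) : Int :=
  if h : stack = [] then 0   -- Python raises IndexError here; outside Pre_f
  else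
    let res := stack.getLast h
    let rest := stack.dropLast
    if rest = [] then res else f rest
termination_by stack.length
decreasing_by
  simp only [List.length_dropLast]
  have := List.length_pos_of_ne_nil h
  omega

-- ===== PORT B =====
-- while len(stack) > 1: temp.append(stack.pop())   (temp is a stack; cons = append-then-pop-last)
def fAltLoop (stack temp : List Int) : List Int × List Int :=
  if h : stack.length > 1 then
    fAltLoop stack.dropLast (stack.getLastD 0 :: temp)
  else (stack, temp)
termination_by stack.length
decreasing_by
  simp only [List.length_dropLast]
  omega

def f_alt (stack : List Int) : Int :=
  -- bottom = stack.pop(): raises on [] (outside Pre_f); the second while loop only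
  -- restores the mutated argument and does not affect the return value.
  (fAltLoop stack []).1.getLastD 0

-- ===== PRECONDITION & SPEC =====
-- Pre_f excludes exactly the empty stack, on which Python A raises IndexError.
def Pre_f (stack : List Int) : Prop := stack ≠ []
instance (stack : List Int) : Decidable (Pre_f stack) := by unfold Pre_f; infer_instance
def pvWitness_f : List Int := [3, 1, 2]

def Spec_f (stack : List Int) (out : Int) : Prop := out = f_alt stack
instance (stack : List Int) (out : Int) : Decidable (Spec_f stack out) := by unfold Spec_f; infer_instance

-- ===== CLAIM (what is proved, stated in full; the proofs are below) =====
def Claim_equal_f : Prop := ∀ (stack : List Int), Dom_f stack → Pre_f stack → Spec_f stack (f stack)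

-- ===== LEMMAS AND PROOFS =====

-- dropping the last element does not change the head, as long as something remains
theorem headD_dropLast (l : List Int) (hl : l.dropLast ≠ []) :
    l.dropLast.headD 0 = l.headD 0 := by
  cases l with
  | nil => simp at hl
  | cons a as =>
    cases as with
    | nil => simp at hl
    | cons b bs => simp

-- A returns the bottom (head) element.
theorem f_eq_headD_len (n : Nat) : ∀ (stack : List Int), stack.length = n → stack ≠ [] →
    f stack = stack.headD 0 := by
  induction n using Nat.strong_induction_on with
  | _ n ih =>
    intro s hn hne
    rw [f, dif_neg hne]
    by_cases hd : s.dropLast = []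
    · rw [if_pos hd]
      cases s with
      | nil => exact absurd rfl hne
      | cons a as =>
        cases as with
        | nil => simp
        | cons b bs => simp at hd
    · rw [if_neg hd]
      have hlt : s.dropLast.length < n := by
        have := List.length_pos_of_ne_nil hne
        simp only [List.length_dropLast]
        omega
      rw [ih s.dropLast.length hlt s.dropLast rfl hd]
      exact headD_dropLast s hd

theorem f_eq_headD (stack : List Int) (h : stack ≠ []) : f stack = stack.headD 0 :=
  f_eq_headD_len stack.length stack rfl h

-- The loop strips elements from the top until one (the bottom) remains.
theorem fAltLoop_fst (stack temp : List Int) (h : stack ≠ []) :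
    (fAltLoop stack temp).1 = [stack.headD 0] := by
  induction stack, temp using fAltLoop.induct with
  | case1 s t hlen ih =>
    rw [fAltLoop, dif_pos hlen]
    have hd : s.dropLast ≠ [] := by
      intro hc
      have := congrArg List.length hc
      simp at this
      omega
    rw [ih hd]
    rw [headD_dropLast s hd]
  | case2 s t hlen =>
    rw [fAltLoop, dif_neg hlen]
    cases s with
    | nil => exact absurd rfl h
    | cons x xs =>
      cases xs with
      | nil => simp
      | cons y ys => exfalso; simp at hlen

theorem f_alt_eq_headD (stack : List Int) (h : stack ≠ []) : f_alt stack = stack.headD 0 := by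
  unfold f_alt
  rw [fAltLoop_fst stack [] h]
  simp

-- ===== VERDICT (by name: the statement is the Claim_ definition above) =====
theorem f_spec : Claim_equal_f := by
  intro stack _ hpre
  unfold Spec_f
  rw [f_eq_headD stack hpre, f_alt_eq_headD stack hpre]
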